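-- pv_equiv track=rewrite | github.com/joojeehwan/algorithm_genius | CodeTree/포탑부수기/haeun_포탑부수기.py | find_row_col
-- ===== SOURCE A (Python) =====
-- def find_row_col(turrets, big_or_small):
--     row_col = []
--     sum_r_c = 0 if big_or_small else 100
--
--     if big_or_small:
--         for r, c in turrets:
--             if sum_r_c < r + c:
--                 sum_r_c = r+c
--                 row_col = [(r, c)]
--             elif sum_r_c == r + c:
--                 row_col.append((r, c))
--     else:
--         for r, c in turrets:
--             if sum_r_c > r + c:
--                 sum_r_c = r + c
--                 row_col = [(r, c)]
--             elif sum_r_c == r + c: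
--                 row_col.append((r, c))
--
--     return row_col
-- ===== SOURCE B (Python) =====
-- def find_row_col(turrets, big_or_small):
--     if big_or_small:
--         target = 0
--         for r, c in turrets:
--             target = max(target, r + c)
--     else:
--         target = 100
--         for r, c in turrets:
--             target = min(target, r + c)
--     return [(r, c) for r, c in turrets if r + c == target]
-- ===== Notes on version B (the rewrite author's own statement) =====
-- stated objective: simpler
-- what changed: Replaces the single pass that rebuilds/extends the tie list on the fly with two plain passes: a clamped max/min reduction to find the target sum (seeded with 0 resp. 100 exactly as A initializes it), then a filter keeping turrets whose coordinate sum equals the target.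
import Mathlib
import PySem

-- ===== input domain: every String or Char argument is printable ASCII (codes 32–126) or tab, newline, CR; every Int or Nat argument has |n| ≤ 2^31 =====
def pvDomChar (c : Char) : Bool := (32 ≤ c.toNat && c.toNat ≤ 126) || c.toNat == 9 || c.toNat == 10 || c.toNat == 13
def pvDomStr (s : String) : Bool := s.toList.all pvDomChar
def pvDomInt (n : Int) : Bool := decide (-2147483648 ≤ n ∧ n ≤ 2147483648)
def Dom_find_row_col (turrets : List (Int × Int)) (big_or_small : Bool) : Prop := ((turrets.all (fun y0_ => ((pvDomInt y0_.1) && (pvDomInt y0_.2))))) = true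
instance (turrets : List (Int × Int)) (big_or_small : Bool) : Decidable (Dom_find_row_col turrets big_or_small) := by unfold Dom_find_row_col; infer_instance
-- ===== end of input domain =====

-- B replaces A's single pass that rebuilds/extends the tie list on the fly by two plain
-- passes: a clamped max/min reduction for the target sum, then a filter (objective: simpler).


-- ===== PORT A =====
-- A's big-branch loop: running max sum with the tie list rebuilt/extended in place
def frcLoopBig : List (Int × Int) → Int → List (Int × Int) → List (Int × Int)
  | [], _, row_col => row_col
  | (r, c) :: ts, sum_r_c, row_col =>
    if sum_r_c < r + c then frcLoopBig ts (r + c) [(r, c)]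
    else if sum_r_c = r + c then frcLoopBig ts sum_r_c (row_col ++ [(r, c)])
    else frcLoopBig ts sum_r_c row_col

-- A's small-branch loop: running min sum with the tie list rebuilt/extended in place
def frcLoopSmall : List (Int × Int) → Int → List (Int × Int) → List (Int × Int)
  | [], _, row_col => row_col
  | (r, c) :: ts, sum_r_c, row_col =>
    if sum_r_c > r + c then frcLoopSmall ts (r + c) [(r, c)]
    else if sum_r_c = r + c then frcLoopSmall ts sum_r_c (row_col ++ [(r, c)])
    else frcLoopSmall ts sum_r_c row_col

def find_row_col (turrets : List (Int × Int)) (big_or_small : Bool) : List (Int × Int) :=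
  if big_or_small then frcLoopBig turrets 0 [] else frcLoopSmall turrets 100 []

-- ===== PORT B =====
def find_row_col_alt (turrets : List (Int × Int)) (big_or_small : Bool) : List (Int × Int) :=
  let target : Int :=
    if big_or_small then turrets.foldl (fun t p => max t (p.1 + p.2)) 0
    else turrets.foldl (fun t p => min t (p.1 + p.2)) 100
  turrets.filter (fun p => p.1 + p.2 == target)

-- ===== PRECONDITION & SPEC =====
def Spec_find_row_col (turrets : List (Int × Int)) (big_or_small : Bool) (out : List (Int × Int)) : Prop := out = find_row_col_alt turrets big_or_small
instance (turrets : List (Int × Int)) (big_or_small : Bool) (out : List (Int × Int)) : Decidable (Spec_find_row_col turrets big_or_small out) := by unfold Spec_find_row_col; infer_instance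

-- ===== CLAIM (what is proved, stated in full; the proofs are below) =====
def Claim_equal_find_row_col : Prop := ∀ (turrets : List (Int × Int)) (big_or_small : Bool), Dom_find_row_col turrets big_or_small → Spec_find_row_col turrets big_or_small (find_row_col turrets big_or_small)

-- ===== LEMMAS AND PROOFS =====
theorem le_foldl_max (ts : List (Int × Int)) (s : Int) :
    s ≤ ts.foldl (fun t p => max t (p.1 + p.2)) s := by
  induction ts generalizing s with
  | nil => simp
  | cons p ts ih => exact le_trans (le_max_left _ _) (ih _)

theorem foldl_min_le (ts : List (Int × Int)) (s : Int) :
    ts.foldl (fun t p => min t (p.1 + p.2)) s ≤ s := by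
  induction ts generalizing s with
  | nil => simp
  | cons p ts ih => exact le_trans (ih _) (min_le_left _ _)

theorem frcLoopBig_eq (ts : List (Int × Int)) (s : Int) (acc : List (Int × Int)) :
    frcLoopBig ts s acc =
      (if ts.foldl (fun t p => max t (p.1 + p.2)) s = s then acc else []) ++
        ts.filter (fun p => p.1 + p.2 == ts.foldl (fun t q => max t (q.1 + q.2)) s) := by
  induction ts generalizing s acc with
  | nil => simp [frcLoopBig]
  | cons p ts ih =>
    obtain ⟨r, c⟩ := p
    have hfold : (((r, c) :: ts).foldl (fun t q => max t (q.1 + q.2)) s)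
        = ts.foldl (fun t q => max t (q.1 + q.2)) (max s (r + c)) := by simp
    by_cases h1 : s < r + c
    · have hmx : max s (r + c) = r + c := max_eq_right (le_of_lt h1)
      have hge := le_foldl_max ts (max s (r + c))
      rw [hmx] at hge
      have hne : ts.foldl (fun t q => max t (q.1 + q.2)) (max s (r + c)) ≠ s := by
        rw [hmx]; omega
      simp only [frcLoopBig, if_pos h1, hfold, List.filter_cons]
      rw [ih, if_neg hne, hmx]
      by_cases h2 : ts.foldl (fun t q => max t (q.1 + q.2)) (r + c) = r + c
      · simp [h2]
      · have : ¬ ((r + c : Int) == ts.foldl (fun t q => max t (q.1 + q.2)) (r + c)) = true := by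
          simp; omega
        simp [h2, this]
    · by_cases h2 : s = r + c
      · have hmx : max s (r + c) = s := by omega
        simp only [frcLoopBig, if_neg h1, if_pos h2, hfold, List.filter_cons]
        rw [ih, hmx]
        subst h2
        by_cases h3 : ts.foldl (fun t q => max t (q.1 + q.2)) (r + c) = r + c
        · simp [h3]
        · simp [h3]; omega
      · have hmx : max s (r + c) = s := by omega
        have hge := le_foldl_max ts s
        simp only [frcLoopBig, if_neg h1, if_neg h2, hfold, List.filter_cons]
        rw [ih, hmx]
        have : ¬ ((r + c : Int) == ts.foldl (fun t q => max t (q.1 + q.2)) s) = true := by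
          simp; omega
        simp [this]

theorem frcLoopSmall_eq (ts : List (Int × Int)) (s : Int) (acc : List (Int × Int)) :
    frcLoopSmall ts s acc =
      (if ts.foldl (fun t p => min t (p.1 + p.2)) s = s then acc else []) ++
        ts.filter (fun p => p.1 + p.2 == ts.foldl (fun t q => min t (q.1 + q.2)) s) := by
  induction ts generalizing s acc with
  | nil => simp [frcLoopSmall]
  | cons p ts ih =>
    obtain ⟨r, c⟩ := p
    have hfold : (((r, c) :: ts).foldl (fun t q => min t (q.1 + q.2)) s)
        = ts.foldl (fun t q => min t (q.1 + q.2)) (min s (r + c)) := by simp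
    by_cases h1 : s > r + c
    · have hmn : min s (r + c) = r + c := min_eq_right (le_of_lt h1)
      have hle := foldl_min_le ts (min s (r + c))
      rw [hmn] at hle
      have hne : ts.foldl (fun t q => min t (q.1 + q.2)) (min s (r + c)) ≠ s := by
        rw [hmn]; omega
      simp only [frcLoopSmall, if_pos h1, hfold, List.filter_cons]
      rw [ih, if_neg hne, hmn]
      by_cases h2 : ts.foldl (fun t q => min t (q.1 + q.2)) (r + c) = r + c
      · simp [h2]
      · have : ¬ ((r + c : Int) == ts.foldl (fun t q => min t (q.1 + q.2)) (r + c)) = true := by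
          simp; omega
        simp [h2, this]
    · by_cases h2 : s = r + c
      · have hmn : min s (r + c) = s := by omega
        simp only [frcLoopSmall, if_neg h1, if_pos h2, hfold, List.filter_cons]
        rw [ih, hmn]
        subst h2
        by_cases h3 : ts.foldl (fun t q => min t (q.1 + q.2)) (r + c) = r + c
        · simp [h3]
        · simp [h3]; omega
      · have hmn : min s (r + c) = s := by omega
        have hle := foldl_min_le ts s
        simp only [frcLoopSmall, if_neg h1, if_neg h2, hfold, List.filter_cons]
        rw [ih, hmn]
        have : ¬ ((r + c : Int) == ts.foldl (fun t q => min t (q.1 + q.2)) s) = true := by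
          simp; omega
        simp [this]

-- ===== VERDICT (by name: the statement is the Claim_ definition above) =====
theorem find_row_col_spec : Claim_equal_find_row_col := by
  intro turrets big_or_small _
  unfold Spec_find_row_col find_row_col find_row_col_alt
  cases big_or_small with
  | true => simp only [if_pos]; rw [frcLoopBig_eq]; split <;> simp
  | false => simp only [Bool.false_eq_true, if_false]; rw [frcLoopSmall_eq]; split <;> simp
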